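-- pv_equiv track=rewrite | github.com/skarwa4491/Python-DSA | Level Up/DE-Shaw/march_king_forward.py | solution
-- ===== SOURCE A (Python) =====
-- def solution(board, sr, sc, dr, dc):
--     if sc == dc and sr == 1:
--         return 1
--     if sr == 0 or sc == 0 or sc > board:
--         return 0
--
--     count1 = solution(board,sr-1, sc-1, dr, dc)
--     count2 = solution(board,sr-1, sc, dr, dc)
--     count3 = solution(board, sr-1, sc + 1, dr, dc)
--
--     return count1+count2+count3
-- ===== SOURCE B (Python) =====
-- def _sums3(xs):
--     return [x + y + z for x, y, z in zip(xs, xs[1:], xs[2:])]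
--
--
-- def solution(board, sr, sc, dr, dc):
--     # Bottom-up DP over rows: level s holds the path counts for every column
--     # reachable at row s; level s+1 is built from adjacent triple sums.
--     if sc == dc and sr == 1:
--         return 1
--     if sc == 0 or sc > board:
--         return 0
--     prev = []
--     for s in range(sr + 1):
--         lo = sc - (sr - s)
--         hi = sc + (sr - s)
--         if s == 0:
--             cur = [0] * (hi - lo + 1)
--         else:
--             cur = [1 if (c == dc and s == 1)
--                    else 0 if (c == 0 or c > board)
--                    else t
--                    for c, t in zip(range(lo, hi + 1), _sums3(prev))]
--         prev = cur
--     return prev[0] if prev else 0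
-- ===== Notes on version B (the rewrite author's own statement) =====
-- stated objective: alternative
-- what changed: Replaced A's exponential three-way recursion by a bottom-up dynamic program that builds each row's path counts over the reachable column window from adjacent triple sums of the previous row.
-- outside the precondition, e.g. on solution(1, 2001, 1, 0, 2): A returns 1, B returns 1
import Mathlib
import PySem

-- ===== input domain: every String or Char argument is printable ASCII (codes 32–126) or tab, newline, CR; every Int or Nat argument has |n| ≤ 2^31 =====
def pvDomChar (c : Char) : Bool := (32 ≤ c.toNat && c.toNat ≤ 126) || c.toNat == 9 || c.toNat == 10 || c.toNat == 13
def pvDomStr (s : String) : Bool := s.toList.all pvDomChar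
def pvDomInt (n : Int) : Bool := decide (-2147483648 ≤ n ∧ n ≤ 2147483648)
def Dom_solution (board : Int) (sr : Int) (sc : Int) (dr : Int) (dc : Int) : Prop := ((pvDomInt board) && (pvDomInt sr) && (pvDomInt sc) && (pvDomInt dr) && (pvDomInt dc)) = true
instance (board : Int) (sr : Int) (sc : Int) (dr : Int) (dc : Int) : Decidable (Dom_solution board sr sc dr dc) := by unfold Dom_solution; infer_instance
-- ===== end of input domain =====

-- B replaces A's three-way recursion by a bottom-up row-by-row DP over the
-- reachable column window (objective: alternative).

-- ===== PORT A =====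
def solution (board : Int) (sr : Int) (sc : Int) (dr : Int) (dc : Int) : Int :=
  if sc = dc ∧ sr = 1 then 1
  else if sr = 0 ∨ sc = 0 ∨ board < sc then 0
  else if sr < 0 then 0  -- totality guard: here the Python recursion never returns (excluded by Pre_)
  else
    let count1 := solution board (sr - 1) (sc - 1) dr dc
    let count2 := solution board (sr - 1) sc dr dc
    let count3 := solution board (sr - 1) (sc + 1) dr dc
    count1 + count2 + count3
termination_by sr.toNat
decreasing_by all_goals omega

-- ===== PORT B =====
-- _sums3(xs): adjacent triple sums (zip(xs, xs[1:], xs[2:]))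
def sums3 : List Int → List Int
  | x :: y :: z :: rest => (x + y + z) :: sums3 (y :: z :: rest)
  | _ => []

def solution_alt (board : Int) (sr : Int) (sc : Int) (dr : Int) (dc : Int) : Int :=
  if sc = dc ∧ sr = 1 then 1
  else if sc = 0 ∨ board < sc then 0
  else
  let prev :=
    (PySem.List.pyRange 0 (sr + 1) 1).foldl
      (fun prev s =>
        let lo := sc - (sr - s)
        let hi := sc + (sr - s)
        if s = 0 then
          List.replicate (hi - lo + 1).toNat 0
        else
          (List.zip (PySem.List.pyRange lo (hi + 1) 1) (sums3 prev)).map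
            (fun p => if p.1 = dc ∧ s = 1 then 1 else if p.1 = 0 ∨ board < p.1 then 0 else p.2))
      []
  prev.headD 0

-- ===== PRECONDITION & SPEC =====
-- Pre_ excludes the inputs on which A's depth-sr recursion raises RecursionError:
-- sr < 0 with 0 < sc ≤ board (the recursion never reaches a base case), and large
-- positive sr with 0 < sc ≤ board, where the depth-sr call chain overruns Python's
-- recursion limit; the sr ≤ 2000 bound keeps a safety margin under that limit, so it
-- also excludes some large-sr inputs on which A still returns (see claim.json cites).
def Pre_solution (board : Int) (sr : Int) (sc : Int) (dr : Int) (dc : Int) : Prop :=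
  sc = 0 ∨ board < sc ∨ (0 ≤ sr ∧ sr ≤ 2000)
instance (board : Int) (sr : Int) (sc : Int) (dr : Int) (dc : Int) : Decidable (Pre_solution board sr sc dr dc) := by unfold Pre_solution; infer_instance

def pvWitness_solution : Int × Int × Int × Int × Int := (2, 2, 1, 2, 1)

def Spec_solution (board : Int) (sr : Int) (sc : Int) (dr : Int) (dc : Int) (out : Int) : Prop := out = solution_alt board sr sc dr dc
instance (board : Int) (sr : Int) (sc : Int) (dr : Int) (dc : Int) (out : Int) : Decidable (Spec_solution board sr sc dr dc out) := by unfold Spec_solution; infer_instance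

-- ===== CLAIM (what is proved, stated in full; the proofs are below) =====
def Claim_equal_solution : Prop := ∀ (board : Int) (sr : Int) (sc : Int) (dr : Int) (dc : Int), Dom_solution board sr sc dr dc → Pre_solution board sr sc dr dc → Spec_solution board sr sc dr dc (solution board sr sc dr dc)

-- ===== LEMMAS AND PROOFS =====

-- level s of the DP: path counts at every column of the window reachable at row s
def pvLev (board : Int) (sr : Int) (sc : Int) (dr : Int) (dc : Int) (s : Int) : List Int :=
  (PySem.List.pyRange (sc - sr + s) (sc + sr - s + 1) 1).map (fun c => solution board s c dr dc)

lemma solution_row_zero (board sc dr dc : Int) : solution board 0 sc dr dc = 0 := by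
  rw [solution]; norm_num

lemma sums3_short (xs : List Int) (h : xs.length ≤ 2) : sums3 xs = [] := by
  match xs with
  | [] => rfl
  | [_] => rfl
  | [_, _] => rfl
  | _ :: _ :: _ :: _ => simp at h

lemma sums3_map (g : Int → Int) : ∀ (n : Nat) (a b : Int), (b - a).toNat = n →
    sums3 ((PySem.List.pyRange a b 1).map g)
      = (PySem.List.pyRange a (b - 2) 1).map (fun c => g c + g (c + 1) + g (c + 2)) := by
  intro n
  induction n with
  | zero =>
    intro a b h
    rw [PySem.List.pyRange_one_eq_nil (by omega), PySem.List.pyRange_one_eq_nil (by omega)]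
    rfl
  | succ n ih =>
    intro a b h
    by_cases hab : a + 2 < b
    · have h1 : a < b := by omega
      have h2 : a + 1 < b := by omega
      have h3 : a + 1 + 1 < b := by omega
      rw [PySem.List.pyRange_one_cons h1, PySem.List.pyRange_one_cons h2,
        PySem.List.pyRange_one_cons h3, PySem.List.pyRange_one_cons (show a < b - 2 by omega)]
      simp only [List.map_cons, sums3]
      rw [show g (a+1) :: g (a+1+1) :: (PySem.List.pyRange (a+1+1+1) b 1).map g
          = (PySem.List.pyRange (a+1) b 1).map g from by
        rw [PySem.List.pyRange_one_cons h2, PySem.List.pyRange_one_cons h3]; simp]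
      rw [ih (a+1) b (by omega)]
      congr 1
      rw [show a+1+1 = a+2 from by ring]
    · rw [PySem.List.pyRange_one_eq_nil (by omega : b - 2 ≤ a), List.map_nil]
      apply sums3_short
      simp only [List.length_map, PySem.List.length_pyRange_one]
      omega

-- the one-step unfolding of A's recursion for rows s ≥ 1
lemma solution_step (board s c dr dc : Int) (hs : 1 ≤ s) :
    solution board s c dr dc
      = if c = dc ∧ s = 1 then 1
        else if c = 0 ∨ board < c then 0
        else solution board (s-1) (c-1) dr dc + solution board (s-1) c dr dc
              + solution board (s-1) (c+1) dr dc := by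
  rw [solution.eq_def]
  have hn : ¬ s < 0 := by omega
  by_cases h1 : c = dc ∧ s = 1
  · rw [if_pos h1, if_pos h1]
  · rw [if_neg h1, if_neg h1]
    by_cases h2 : c = 0 ∨ board < c
    · rw [if_pos (by tauto : s = 0 ∨ c = 0 ∨ board < c), if_pos h2]
    · rw [if_neg (by omega : ¬ (s = 0 ∨ c = 0 ∨ board < c)), if_neg h2, if_neg hn]

-- one outer-loop step, on rows 1 ≤ s ≤ sr, maps level s-1 to level s
lemma step_lev (board sr sc dr dc s : Int) (h1 : 1 ≤ s) (h2 : s ≤ sr) :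
    ((List.zip (PySem.List.pyRange (sc - (sr - s)) (sc + (sr - s) + 1) 1)
        (sums3 (pvLev board sr sc dr dc (s - 1)))).map
      (fun p => if p.1 = dc ∧ s = 1 then 1 else if p.1 = 0 ∨ board < p.1 then 0 else p.2))
      = pvLev board sr sc dr dc s := by
  have hrw : sums3 (pvLev board sr sc dr dc (s - 1))
      = (PySem.List.pyRange (sc - sr + s - 1) (sc + sr - s) 1).map
          (fun c => solution board (s-1) c dr dc + solution board (s-1) (c+1) dr dc
            + solution board (s-1) (c+2) dr dc) := by
    unfold pvLev
    rw [sums3_map _ ((sc + sr - (s-1) + 1) - (sc - sr + (s-1))).toNat _ _ rfl]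
    congr 2 <;> omega
  rw [hrw]
  unfold pvLev
  rw [show sc - (sr - s) = sc - sr + s from by ring,
    show sc + (sr - s) + 1 = sc + sr - s + 1 from by ring]
  rw [PySem.List.pyRange_one (sc - sr + s) (sc + sr - s + 1),
    PySem.List.pyRange_one (sc - sr + s - 1) (sc + sr - s)]
  rw [show ((sc + sr - s) - (sc - sr + s - 1)).toNat = ((sc + sr - s + 1) - (sc - sr + s)).toNat from by omega]
  rw [List.map_map, List.zip_map', List.map_map, List.map_map]
  apply List.map_congr_left
  intro k _
  simp only [Function.comp_apply]
  rw [solution_step board s (sc - sr + s + (k:Int)) dr dc h1]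
  by_cases hb : sc - sr + s + (k:Int) = dc ∧ s = 1
  · rw [if_pos hb, if_pos hb]
  · rw [if_neg hb, if_neg hb]
    by_cases hz : sc - sr + s + (k:Int) = 0 ∨ board < sc - sr + s + (k:Int)
    · rw [if_pos hz, if_pos hz]
    · rw [if_neg hz, if_neg hz]
      rw [show sc - sr + s - 1 + (k:Int) = sc - sr + s + (k:Int) - 1 from by ring]
      rw [show sc - sr + s + (k:Int) - 1 + 1 = sc - sr + s + (k:Int) from by ring]
      rw [show sc - sr + s + (k:Int) - 1 + 2 = sc - sr + s + (k:Int) + 1 from by ring]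

lemma fold_lev (board sr sc dr dc : Int) (hsr : 0 ≤ sr) :
    ∀ (n : Nat), (n : Int) ≤ sr →
      ((PySem.List.pyRange 0 ((n : Int) + 1) 1).foldl
        (fun prev s =>
          let lo := sc - (sr - s)
          let hi := sc + (sr - s)
          if s = 0 then
            List.replicate (hi - lo + 1).toNat 0
          else
            (List.zip (PySem.List.pyRange lo (hi + 1) 1) (sums3 prev)).map
              (fun p => if p.1 = dc ∧ s = 1 then 1 else if p.1 = 0 ∨ board < p.1 then 0 else p.2))
        []) = pvLev board sr sc dr dc n := by
  intro n
  induction n with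
  | zero =>
    intro _
    rw [show ((0:Nat):Int) = 0 from by norm_num, PySem.List.pyRange_one_singleton]
    simp only [List.foldl_cons, List.foldl_nil]
    rw [if_pos trivial]
    unfold pvLev
    rw [show (fun c => solution board 0 c dr dc) = (fun _ : Int => (0:Int)) from
      funext (fun c => solution_row_zero board c dr dc)]
    rw [List.map_const', PySem.List.length_pyRange_one]
    congr 1
    omega
  | succ n ih =>
    intro hle
    rw [show ((n+1 : Nat) : Int) + 1 = ((n:Int) + 1) + 1 from by push_cast; ring,
      PySem.List.pyRange_one_succ_right (by omega)]
    rw [List.foldl_append, ih (by omega)]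
    simp only [List.foldl_cons, List.foldl_nil]
    rw [if_neg (by omega : ¬ ((n:Int) + 1) = 0)]
    have := step_lev board sr sc dr dc ((n:Int)+1) (by omega) (by push_cast at hle ⊢; omega)
    rw [show (n:Int) + 1 - 1 = (n:Int) from by ring] at this
    rw [show ((n+1 : Nat) : Int) = (n:Int) + 1 from by push_cast; ring]
    exact this

-- ===== VERDICT (by name: the statement is the Claim_ definition above) =====
theorem solution_spec : Claim_equal_solution := by
  intro board sr sc dr dc _ hpre
  unfold Spec_solution
  unfold solution_alt
  by_cases h1 : sc = dc ∧ sr = 1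
  · rw [if_pos h1, solution.eq_def, if_pos h1]
  · rw [if_neg h1]
    by_cases h2 : sc = 0 ∨ board < sc
    · rw [if_pos h2, solution.eq_def, if_neg h1,
        if_pos (by tauto : sr = 0 ∨ sc = 0 ∨ board < sc)]
    · rw [if_neg h2]
      have hsr : 0 ≤ sr := by unfold Pre_solution at hpre; omega
      rw [show sr + 1 = (sr.toNat : Int) + 1 from by omega]
      rw [fold_lev board sr sc dr dc hsr sr.toNat (by omega)]
      rw [show ((sr.toNat : Int)) = sr from by omega]
      unfold pvLev
      rw [show sc - sr + sr = sc from by ring, show sc + sr - sr + 1 = sc + 1 from by ring,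
        PySem.List.pyRange_one_singleton]
      simp
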